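-- pv_equiv track=rewrite | github.com/techiekeith/aoc2024 | aoc2024/day7.py | find_operators
-- ===== SOURCE A (Python) =====
-- def find_operators(equation, allow_concatenation = False):
--     (test_value, operand_list) = equation
--     if len(operand_list) == 1:
--         if test_value == operand_list[0]:
--             return [[]]
--         return []
--     operators = []
--     multiply = operand_list[0] * operand_list[1]
--     add = operand_list[0] + operand_list[1]
--     if multiply <= test_value:
--         operators += [["*"] + others for others in find_operators((test_value, [multiply] + operand_list[2:]), allow_concatenation)]
--     if add <= test_value:
--         operators += [["+"] + others for others in find_operators((test_value, [add] + operand_list[2:]), allow_concatenation)]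
--     if allow_concatenation:
--         concat = int(f"{operand_list[0]}{operand_list[1]}")
--         if concat <= test_value:
--             operators += [["||"] + others for others in find_operators((test_value, [concat] + operand_list[2:]), allow_concatenation)]
--     return operators
-- ===== SOURCE B (Python) =====
-- def find_operators(equation, allow_concatenation = False):
--     (test_value, operand_list) = equation
--     result = []
--     stack = [(operand_list, [])]
--     while stack:
--         (ops, prefix) = stack.pop()
--         if len(ops) == 1:
--             if test_value == ops[0]:
--                 result.append(prefix)
--             continue
--         a, b, rest = ops[0], ops[1], ops[2:]
--         children = []
--         multiply = a * b
--         if multiply <= test_value: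
--             children.append(([multiply] + rest, prefix + ["*"]))
--         add = a + b
--         if add <= test_value:
--             children.append(([add] + rest, prefix + ["+"]))
--         if allow_concatenation:
--             concat = int(f"{a}{b}")
--             if concat <= test_value:
--                 children.append(([concat] + rest, prefix + ["||"]))
--         stack.extend(reversed(children))
--     return result
-- ===== Notes on version B (the rewrite author's own statement) =====
-- stated objective: alternative
-- what changed: Replaced A's recursive branching (recursing on a pair with the folded head operand) by an iterative depth-first search over an explicit stack of (operands, operator-prefix) frames, pushing pruned children in reverse order to preserve A's output order.
-- outside the precondition, e.g. on find_operators((0, [1, 1, -5]), True): A returns [], B returns []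
import Mathlib
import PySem

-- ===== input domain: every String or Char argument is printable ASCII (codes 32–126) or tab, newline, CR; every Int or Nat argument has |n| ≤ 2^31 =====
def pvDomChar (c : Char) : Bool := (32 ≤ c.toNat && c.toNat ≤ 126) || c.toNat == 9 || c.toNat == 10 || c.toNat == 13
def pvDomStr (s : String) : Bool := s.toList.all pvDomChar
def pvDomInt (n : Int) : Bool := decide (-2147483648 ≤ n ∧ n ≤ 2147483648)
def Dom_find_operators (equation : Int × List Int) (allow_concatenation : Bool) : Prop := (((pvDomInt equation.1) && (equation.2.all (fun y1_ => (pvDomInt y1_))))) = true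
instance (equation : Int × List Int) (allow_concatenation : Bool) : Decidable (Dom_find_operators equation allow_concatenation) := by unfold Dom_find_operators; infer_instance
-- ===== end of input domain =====

-- B is an iterative explicit-stack DFS replacing A's recursion; same pruning, same output order.
-- Equivalence is about return values only (neither program mutates its arguments).

-- ===== PORT A =====
-- int(f"{a}{b}"): Pre_ guarantees the concatenated string parses, so getD 0 is never reached inside Pre_.
def pyConcat (a b : Int) : Int :=
  (PySem.Int.ofStr? (PySem.Int.toStr a ++ PySem.Int.toStr b)).getD 0

-- A's recursion, on the operand list (test value and flag are invariant through the recursion).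
def findOpsA (t : Int) (ac : Bool) : List Int → List (List String)
  | [] => []            -- Python raises IndexError here; excluded by Pre_
  | [x] => if t = x then [[]] else []
  | a :: b :: rest =>
    (if a * b ≤ t then (findOpsA t ac ((a * b) :: rest)).map (fun o => "*" :: o) else []) ++
    (if a + b ≤ t then (findOpsA t ac ((a + b) :: rest)).map (fun o => "+" :: o) else []) ++
    (if ac then
      (if pyConcat a b ≤ t then (findOpsA t ac ((pyConcat a b) :: rest)).map (fun o => "||" :: o) else [])
     else [])
termination_by l => l.length
decreasing_by all_goals simp

def find_operators (equation : Int × List Int) (allow_concatenation : Bool) : List (List String) :=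
  findOpsA equation.1 allow_concatenation equation.2

-- ===== PORT B =====
-- stack-frame measure used for termination of the while loop
def altMeasure (stack : List (List Int × List String)) : Nat :=
  (stack.map (fun f => 4 ^ f.1.length)).sum

-- the while loop of B: pop a frame, emit or push pruned children (in reverse operator order)
def altLoop (t : Int) (ac : Bool) : List (List Int × List String) → List (List String) → List (List String)
  | [], result => result
  | (ops, pfx) :: stack, result =>
    match ops with
    | [] => altLoop t ac stack result      -- unreachable inside Pre_ (Python would raise)
    | [x] => altLoop t ac stack (if t = x then result ++ [pfx] else result)
    | a :: b :: rest =>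
      let children :=
        (if a * b ≤ t then [((a * b) :: rest, pfx ++ ["*"])] else []) ++
        (if a + b ≤ t then [((a + b) :: rest, pfx ++ ["+"])] else []) ++
        (if ac then
          (if pyConcat a b ≤ t then [((pyConcat a b) :: rest, pfx ++ ["||"])] else [])
         else [])
      altLoop t ac (children ++ stack) result
termination_by stack _ => altMeasure stack
decreasing_by
  · simp [altMeasure]
  · simp [altMeasure]
  · simp only [altMeasure, List.map_append, List.sum_append]
    have hp : 1 ≤ 4 ^ rest.length := Nat.one_le_two_pow.trans (Nat.pow_le_pow_left (by omega) _)
    split_ifs <;> simp [pow_succ] <;> omega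

def find_operators_alt (equation : Int × List Int) (allow_concatenation : Bool) : List (List String) :=
  altLoop equation.1 allow_concatenation [(equation.2, [])] []

-- ===== PRECONDITION & SPEC =====
-- Pre_ excludes the empty operand list (IndexError) and, when concatenation is allowed, operand
-- lists with a negative element after the first, on which A raises ValueError from int() whenever
-- such a concatenation is reached (on some such inputs pruning keeps A from reaching it and A
-- still returns; those inputs are excluded too — see the cite in claim.json).
def Pre_find_operators (equation : Int × List Int) (allow_concatenation : Bool) : Prop :=
  equation.2 ≠ [] ∧ (allow_concatenation = true → ∀ x ∈ equation.2.tail, 0 ≤ x)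
instance (equation : Int × List Int) (allow_concatenation : Bool) : Decidable (Pre_find_operators equation allow_concatenation) := by unfold Pre_find_operators; infer_instance

def pvWitness_find_operators : (Int × List Int) × Bool := ((190, [19, 10, 2]), true)

def Spec_find_operators (equation : Int × List Int) (allow_concatenation : Bool) (out : List (List String)) : Prop := out = find_operators_alt equation allow_concatenation
instance (equation : Int × List Int) (allow_concatenation : Bool) (out : List (List String)) : Decidable (Spec_find_operators equation allow_concatenation out) := by unfold Spec_find_operators; infer_instance

-- ===== CLAIM (what is proved, stated in full; the proofs are below) =====
def Claim_equal_find_operators : Prop := ∀ (equation : Int × List Int) (allow_concatenation : Bool), Dom_find_operators equation allow_concatenation → Pre_find_operators equation allow_concatenation → Spec_find_operators equation allow_concatenation (find_operators equation allow_concatenation)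

-- ===== LEMMAS AND PROOFS =====

-- Popping one frame appends that frame's (pfx-mapped) A-results to the accumulator.
lemma altLoop_frame (t : Int) (ac : Bool) :
    ∀ (n : Nat) (ops : List Int) (pre : List String)
      (stack : List (List Int × List String)) (result : List (List String)),
      ops.length ≤ n →
      altLoop t ac ((ops, pre) :: stack) result
        = altLoop t ac stack (result ++ (findOpsA t ac ops).map (fun o => pre ++ o)) := by
  intro n
  induction n with
  | zero =>
    intro ops pre stack result h
    have : ops = [] := List.eq_nil_of_length_eq_zero (Nat.le_zero.mp h)
    subst this
    simp [altLoop, findOpsA]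
  | succ n ih =>
    intro ops pre stack result h
    match ops with
    | [] => simp [altLoop, findOpsA]
    | [x] =>
      simp only [altLoop, findOpsA]
      split_ifs <;> simp
    | a :: b :: rest =>
      have hlen : rest.length + 1 ≤ n := by
        simpa [Nat.succ_le_succ_iff] using h
      simp only [altLoop, findOpsA]
      -- peel the (up to three) children with the induction hypothesis
      split_ifs with h1 h2 h3 h4 <;>
        simp only [List.cons_append, List.nil_append, List.append_nil] <;>
        repeat rw [ih _ _ _ _ (by simpa using hlen)]
      all_goals simp [List.map_map, Function.comp_def]

-- ===== VERDICT (by name: the statement is the Claim_ definition above) =====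
theorem find_operators_spec : Claim_equal_find_operators := by
  intro equation ac _ _
  unfold Spec_find_operators find_operators find_operators_alt
  rw [altLoop_frame equation.1 ac equation.2.length equation.2 [] [] [] (le_refl _)]
  simp [altLoop]
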